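-- pv_equiv track=rewrite | github.com/GVett/mRNA-Transcription-Tool | translation/mrna_translator.py | separate_into_codons
-- ===== SOURCE A (Python) =====
-- def separate_into_codons(mrna_sequences):
--     """Convert mRNA sequence(s) into lists of codons."""
--
--     # allow a single sequence to be passed
--     if isinstance(mrna_sequences, str):
--         mrna_sequences = [mrna_sequences]
--
--     codon_lists = []
--     for seq in mrna_sequences:
--         seq = seq.lower()
--         codons = []
--         # take groups of 3, ignore trailing bases
--         for i in range(0, len(seq) - (len(seq) % 3), 3):
--             codon = seq[i:i+3]
--             codons.append(codon)
--         codon_lists.append(codons)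
--
--     return codon_lists
-- ===== SOURCE B (Python) =====
-- def separate_into_codons(mrna_sequences):
--     """Convert mRNA sequence(s) into lists of codons."""
--     if isinstance(mrna_sequences, str):
--         mrna_sequences = [mrna_sequences]
--     codon_lists = []
--     for seq in mrna_sequences:
--         codons = []
--         buf = ""
--         for ch in seq.lower():
--             buf += ch
--             if len(buf) == 3:
--                 codons.append(buf)
--                 buf = ""
--         # leftover buf of length 1 or 2 (trailing bases) is discarded
--         codon_lists.append(codons)
--     return codon_lists
-- ===== Notes on version B (the rewrite author's own statement) =====
-- stated objective: alternative
-- what changed: B replaces A's precomputed range of complete-codon start indices with fixed-window slicing by a single streaming pass that accumulates characters into a buffer and emits it as a codon whenever it reaches length 3, discarding the partial trailing buffer.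
import Mathlib
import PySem

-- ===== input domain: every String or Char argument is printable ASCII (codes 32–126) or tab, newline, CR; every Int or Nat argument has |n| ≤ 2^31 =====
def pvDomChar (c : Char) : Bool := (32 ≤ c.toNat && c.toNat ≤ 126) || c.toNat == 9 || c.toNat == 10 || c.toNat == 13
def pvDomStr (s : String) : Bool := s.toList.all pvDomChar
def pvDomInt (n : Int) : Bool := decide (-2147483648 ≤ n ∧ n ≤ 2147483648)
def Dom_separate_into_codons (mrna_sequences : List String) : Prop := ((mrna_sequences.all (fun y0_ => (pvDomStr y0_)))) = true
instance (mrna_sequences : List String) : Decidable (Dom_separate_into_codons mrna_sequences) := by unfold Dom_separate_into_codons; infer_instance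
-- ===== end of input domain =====

-- B replaces A's precomputed complete-codon index range + fixed-window slicing by a single
-- streaming pass that accumulates characters into a buffer and emits it whenever it holds 3
-- characters (objective: alternative decomposition, same O(n) cost).


-- ===== PORT A =====
-- inner loop of A: for i in range(0, len(seq) - (len(seq) % 3), 3): codons.append(seq[i:i+3])
def pvAInner (seq0 : String) : List String :=
  let seq := PySem.Str.lower seq0
  let n : Int := PySem.Str.len seq
  (PySem.List.pyRange 0 (n - PySem.Int.mod n 3) 3).foldl
    (fun codons i => codons ++ [PySem.Str.slice seq (some i) (some (i + 3))]) []

def separate_into_codons (mrna_sequences : List String) : List (List String) :=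
  mrna_sequences.foldl (fun codon_lists seq => codon_lists ++ [pvAInner seq]) []

-- ===== PORT B =====
-- inner loop of B: stream characters into a buffer, emit it as a codon at length 3
def pvBInner (seq : String) : List String :=
  ((PySem.Str.lower seq).toList.foldl
    (fun (st : List String × String) ch =>
      let buf := st.2.push ch
      if PySem.Str.len buf = 3 then (st.1 ++ [buf], "") else (st.1, buf))
    ([], "")).1

def separate_into_codons_alt (mrna_sequences : List String) : List (List String) :=
  mrna_sequences.foldl (fun codon_lists seq => codon_lists ++ [pvBInner seq]) []

-- ===== PRECONDITION & SPEC =====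
def Spec_separate_into_codons (mrna_sequences : List String) (out : List (List String)) : Prop := out = separate_into_codons_alt mrna_sequences
instance (mrna_sequences : List String) (out : List (List String)) : Decidable (Spec_separate_into_codons mrna_sequences out) := by unfold Spec_separate_into_codons; infer_instance

-- ===== CLAIM (what is proved, stated in full; the proofs are below) =====
def Claim_equal_separate_into_codons : Prop := ∀ (mrna_sequences : List String), Dom_separate_into_codons mrna_sequences → Spec_separate_into_codons mrna_sequences (separate_into_codons mrna_sequences)

-- ===== LEMMAS AND PROOFS =====

-- the common value of both inner loops: the list of complete 3-character chunks
def pvChunk3 : List Char → List String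
  | a :: b :: c :: t => String.ofList [a, b, c] :: pvChunk3 t
  | _ => []

theorem pvChunk3_small (cs : List Char) (h : cs.length < 3) : pvChunk3 cs = [] := by
  match cs with
  | [] => rfl
  | [_] => rfl
  | [_, _] => rfl
  | _ :: _ :: _ :: _ => simp at h; omega

-- B's buffered fold computes pvChunk3
theorem pvB_fold_chunk3 (cs : List Char) : ∀ (acc : List String),
    (cs.foldl
      (fun (st : List String × String) ch =>
        let buf := st.2.push ch
        if PySem.Str.len buf = 3 then (st.1 ++ [buf], "") else (st.1, buf))
      (acc, "")).1 = acc ++ pvChunk3 cs := by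
  induction cs using pvChunk3.induct with
  | case1 a b c t ih =>
    intro acc
    have h1 : PySem.Str.len ("".push a) ≠ 3 := by
      simp [PySem.Str.len_eq]
    have h2 : PySem.Str.len (("".push a).push b) ≠ 3 := by
      simp [PySem.Str.len_eq]
    have h3 : PySem.Str.len ((("".push a).push b).push c) = 3 := by
      simp [PySem.Str.len_eq]
    have hstr : (("".push a).push b).push c = String.ofList [a, b, c] := by
      rw [← String.toList_inj]; simp
    simp only [List.foldl_cons, if_neg h1, if_neg h2, if_pos h3]
    rw [ih (acc ++ [(("".push a).push b).push c])]
    simp [pvChunk3, hstr]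
  | case2 cs hne =>
    intro acc
    match cs, hne with
    | [], _ => simp [pvChunk3]
    | [a], _ =>
      have h1 : PySem.Str.len ("".push a) ≠ 3 := by simp [PySem.Str.len_eq]
      simp [pvChunk3]
    | [a, b], _ =>
      have h1 : PySem.Str.len ("".push a) ≠ 3 := by simp [PySem.Str.len_eq]
      have h2 : PySem.Str.len (("".push a).push b) ≠ 3 := by simp [PySem.Str.len_eq]
      simp [pvChunk3]
    | a :: b :: c :: t, h => exact (h a b c t rfl).elim

theorem pvBInner_eq (s : String) : pvBInner s = pvChunk3 (PySem.Str.lower s).toList := by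
  unfold pvBInner
  rw [pvB_fold_chunk3 ((PySem.Str.lower s).toList) []]
  simp

-- range(0, 3*k, 3) = [3*j for j in range(k)]
theorem pvRange3 (k : Nat) :
    PySem.List.pyRange 0 (3 * (k : Int)) 3 = (List.range k).map (fun j : Nat => 3 * (j : Int)) := by
  rw [PySem.List.pyRange_of_pos 0 (3 * (k : Int)) (by norm_num)]
  by_cases hk : 0 < k
  · rw [if_pos (by exact_mod_cast Nat.mul_pos (by norm_num) hk)]
    have : ((3 * (k : Int) - 0 + 3 - 1) / 3).toNat = k := by omega
    rw [this]
    apply List.map_congr_left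
    intro j _
    ring
  · have hk0 : k = 0 := by omega
    subst hk0
    simp

-- A's indexed slicing fold computes pvChunk3
theorem pvA_map_chunk3 (cs : List Char) :
    (List.range (cs.length / 3)).map
      (fun j => String.ofList ((cs.drop (3 * j)).take 3)) = pvChunk3 cs := by
  induction cs using pvChunk3.induct with
  | case1 a b c t ih =>
    have hlen : (a :: b :: c :: t).length / 3 = t.length / 3 + 1 := by
      simp [List.length_cons]; omega
    rw [hlen, List.range_succ_eq_map]
    simp only [List.map_cons, List.map_map]
    show _ = String.ofList [a, b, c] :: pvChunk3 t
    refine congrArg₂ List.cons (by norm_num) ?_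
    rw [← ih]
    apply List.map_congr_left
    intro j _
    simp only [Function.comp]
    have h3j : 3 * Nat.succ j = (3 * j).succ.succ.succ := by omega
    rw [h3j, List.drop_succ_cons, List.drop_succ_cons, List.drop_succ_cons]
  | case2 cs hne =>
    have h3 : cs.length < 3 := by
      match cs, hne with
      | [], _ => simp
      | [_], _ => simp
      | [_, _], _ => simp
      | a :: b :: c :: t, h => exact (h a b c t rfl).elim
    rw [pvChunk3_small cs h3]
    have : cs.length / 3 = 0 := by omega
    simp [this]

theorem pvA_fold (seq : String) :
    (PySem.List.pyRange 0 (PySem.Str.len seq - PySem.Int.mod (PySem.Str.len seq) 3) 3).foldl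
      (fun codons i => codons ++ [PySem.Str.slice seq (some i) (some (i + 3))]) []
    = pvChunk3 seq.toList := by
  have hbound : PySem.Str.len seq - PySem.Int.mod (PySem.Str.len seq) 3
      = 3 * ((seq.toList.length / 3 : Nat) : Int) := by
    rw [PySem.Str.len_eq seq]
    rw [show PySem.Int.mod ((seq.toList.length : Nat) : Int) 3
          = ((seq.toList.length % 3 : Nat) : Int) from
        by exact_mod_cast PySem.Int.mod_natCast seq.toList.length 3]
    push_cast
    omega
  rw [hbound, pvRange3, PySem.List.foldl_append_singleton_eq_map]
  rw [← pvA_map_chunk3 seq.toList]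
  simp only [List.nil_append, List.map_map]
  apply List.map_congr_left
  intro j hj
  simp only [List.mem_range] at hj
  have hj3 : 3 * j + 3 ≤ seq.toList.length := by omega
  simp only [Function.comp]
  rw [← String.toList_inj, PySem.Str.toList_slice]
  show PySem.List.slice seq.toList (some (3 * (j : Int))) (some (3 * (j : Int) + 3)) = _
  rw [PySem.List.slice_of_nonneg seq.toList (by positivity) (by positivity)
    (by exact_mod_cast by omega) (by exact_mod_cast by omega)]
  simp only [String.toList_ofList]
  rw [show ((3 * (j : Int) + 3).toNat - (3 * (j : Int)).toNat) = 3 from by omega,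
      show (3 * (j : Int)).toNat = 3 * j from by omega]

theorem pvAInner_eq (s : String) : pvAInner s = pvChunk3 (PySem.Str.lower s).toList := by
  unfold pvAInner
  exact pvA_fold (PySem.Str.lower s)

-- ===== VERDICT (by name: the statement is the Claim_ definition above) =====
theorem separate_into_codons_spec : Claim_equal_separate_into_codons := by
  intro mrna_sequences _
  unfold Spec_separate_into_codons separate_into_codons separate_into_codons_alt
  rw [PySem.List.foldl_append_singleton_eq_map, PySem.List.foldl_append_singleton_eq_map]
  apply congrArg
  apply List.map_congr_left
  intro s _
  rw [pvAInner_eq, pvBInner_eq]
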